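-- pv_equiv track=rewrite | github.com/arnavmmittal/AISportsAgent | services/_deprecated/mcp-server/app/features/practice_integration.py | get_mental_skill_from_protocol
-- ===== SOURCE A (Python) =====
-- def get_mental_skill_from_protocol(protocol_name: str) -> str:
--     """
--     Map protocol/technique name to mental skill category.
--
--     Args:
--         protocol_name: Name of selected protocol (e.g., "Box Breathing for Arousal Control")
--
--     Returns:
--         Mental skill category
--     """
--     protocol_lower = protocol_name.lower()
--
--     if any(term in protocol_lower for term in ["breath", "arousal", "relax", "calm"]):
--         return "arousal_regulation"
--     elif any(term in protocol_lower for term in ["focus", "attention", "concentration", "cue"]):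
--         return "attentional_control"
--     elif any(term in protocol_lower for term in ["confidence", "self-efficacy", "belief"]):
--         return "confidence_building"
--     elif any(term in protocol_lower for term in ["self-talk", "cognitive", "reframing"]):
--         return "self_talk"
--     elif any(term in protocol_lower for term in ["imagery", "visualization", "mental rehearsal"]):
--         return "imagery"
--     elif any(term in protocol_lower for term in ["routine", "pre-performance", "ritual"]):
--         return "routine_development"
--     elif any(term in protocol_lower for term in ["motivation", "goal", "drive"]):
--         return "motivation"
--     elif any(term in protocol_lower for term in ["recovery", "resilience", "reset", "post-error"]):
--         return "recovery_mindset"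
--     else:
--         return "arousal_regulation"  # Default fallback
-- ===== SOURCE B (Python) =====
-- # Flat keyword -> priority map; the answer is the category of MINIMUM priority
-- # among all matching keywords (not a first-match early-return chain).
-- KEYWORD_PRIORITY = {
--     "breath": 0, "arousal": 0, "relax": 0, "calm": 0,
--     "focus": 1, "attention": 1, "concentration": 1, "cue": 1,
--     "confidence": 2, "self-efficacy": 2, "belief": 2,
--     "self-talk": 3, "cognitive": 3, "reframing": 3,
--     "imagery": 4, "visualization": 4, "mental rehearsal": 4,
--     "routine": 5, "pre-performance": 5, "ritual": 5,
--     "motivation": 6, "goal": 6, "drive": 6,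
--     "recovery": 7, "resilience": 7, "reset": 7, "post-error": 7,
-- }
--
-- CATEGORIES = ["arousal_regulation", "attentional_control", "confidence_building",
--               "self_talk", "imagery", "routine_development", "motivation",
--               "recovery_mindset"]
--
--
-- def get_mental_skill_from_protocol(protocol_name: str) -> str:
--     """Map protocol/technique name to mental skill category."""
--     text = protocol_name.lower()
--     best = min((prio for term, prio in KEYWORD_PRIORITY.items() if term in text),
--                default=0)
--     return CATEGORIES[best]
-- ===== Notes on version B (the rewrite author's own statement) =====
-- stated objective: alternative
-- what changed: Instead of an ordered first-match if/elif chain over keyword groups, B scans one flat keyword->priority map, collects the priorities of ALL matching keywords, takes their minimum (default 0) and indexes a category table with it.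
import Mathlib
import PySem

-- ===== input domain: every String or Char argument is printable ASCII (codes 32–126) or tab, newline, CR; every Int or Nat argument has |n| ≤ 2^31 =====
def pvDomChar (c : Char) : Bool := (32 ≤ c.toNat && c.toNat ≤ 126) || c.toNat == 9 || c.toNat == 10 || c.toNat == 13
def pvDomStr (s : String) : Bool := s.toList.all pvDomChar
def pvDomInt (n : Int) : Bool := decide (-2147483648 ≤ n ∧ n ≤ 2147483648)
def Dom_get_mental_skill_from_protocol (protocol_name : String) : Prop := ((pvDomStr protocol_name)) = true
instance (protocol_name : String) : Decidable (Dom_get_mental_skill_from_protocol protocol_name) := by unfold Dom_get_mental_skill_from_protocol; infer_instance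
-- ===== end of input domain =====

set_option maxHeartbeats 2000000

-- B replaces A's first-match if/elif chain by a minimum-priority computation over a flat
-- keyword→priority map: collect the priorities of ALL matching keywords and take their
-- minimum (default 0), then index a category table (objective: alternative).

-- ===== PORT A =====
def get_mental_skill_from_protocol (protocol_name : String) : String :=
  let protocol_lower := PySem.Str.lower protocol_name
  if ["breath", "arousal", "relax", "calm"].any (fun term => PySem.Str.isIn term protocol_lower) then
    "arousal_regulation"
  else if ["focus", "attention", "concentration", "cue"].any (fun term => PySem.Str.isIn term protocol_lower) then
    "attentional_control"
  else if ["confidence", "self-efficacy", "belief"].any (fun term => PySem.Str.isIn term protocol_lower) then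
    "confidence_building"
  else if ["self-talk", "cognitive", "reframing"].any (fun term => PySem.Str.isIn term protocol_lower) then
    "self_talk"
  else if ["imagery", "visualization", "mental rehearsal"].any (fun term => PySem.Str.isIn term protocol_lower) then
    "imagery"
  else if ["routine", "pre-performance", "ritual"].any (fun term => PySem.Str.isIn term protocol_lower) then
    "routine_development"
  else if ["motivation", "goal", "drive"].any (fun term => PySem.Str.isIn term protocol_lower) then
    "motivation"
  else if ["recovery", "resilience", "reset", "post-error"].any (fun term => PySem.Str.isIn term protocol_lower) then
    "recovery_mindset"
  else
    "arousal_regulation"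

-- ===== PORT B =====
-- flat KEYWORD_PRIORITY dict of Source B (insertion order, all keys distinct)
def pvKeywordPriority : List (String × Nat) :=
  [("breath", 0), ("arousal", 0), ("relax", 0), ("calm", 0),
   ("focus", 1), ("attention", 1), ("concentration", 1), ("cue", 1),
   ("confidence", 2), ("self-efficacy", 2), ("belief", 2),
   ("self-talk", 3), ("cognitive", 3), ("reframing", 3),
   ("imagery", 4), ("visualization", 4), ("mental rehearsal", 4),
   ("routine", 5), ("pre-performance", 5), ("ritual", 5),
   ("motivation", 6), ("goal", 6), ("drive", 6),
   ("recovery", 7), ("resilience", 7), ("reset", 7), ("post-error", 7)]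

def pvCategories : List String :=
  ["arousal_regulation", "attentional_control", "confidence_building",
   "self_talk", "imagery", "routine_development", "motivation",
   "recovery_mindset"]

def get_mental_skill_from_protocol_alt (protocol_name : String) : String :=
  let text := PySem.Str.lower protocol_name
  -- min((prio for term, prio in KEYWORD_PRIORITY.items() if term in text), default=0)
  let matched := (pvKeywordPriority.filter (fun tp => PySem.Str.isIn tp.1 text)).map Prod.snd
  let best := (PySem.List.min? matched (fun x => x)).getD 0
  -- CATEGORIES[best]: best is always a valid index (0 ≤ best ≤ 7 < 8), so plain getD is exact here
  pvCategories.getD best ""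

-- ===== PRECONDITION & SPEC =====
def Spec_get_mental_skill_from_protocol (protocol_name : String) (out : String) : Prop := out = get_mental_skill_from_protocol_alt protocol_name
instance (protocol_name : String) (out : String) : Decidable (Spec_get_mental_skill_from_protocol protocol_name out) := by unfold Spec_get_mental_skill_from_protocol; infer_instance

-- ===== CLAIM (what is proved, stated in full; the proofs are below) =====
def Claim_equal_get_mental_skill_from_protocol : Prop := ∀ (protocol_name : String), Dom_get_mental_skill_from_protocol protocol_name → Spec_get_mental_skill_from_protocol protocol_name (get_mental_skill_from_protocol protocol_name)

-- ===== LEMMAS AND PROOFS =====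

def pvMatched (text : String) : List Nat :=
  (pvKeywordPriority.filter (fun tp => PySem.Str.isIn tp.1 text)).map Prod.snd

lemma pv_min_getD_eq (xs : List Nat) (i : Nat) (hmem : i ∈ xs)
    (hlb : ∀ m ∈ xs, i ≤ m) :
    (PySem.List.min? xs (fun x => x)).getD 0 = i := by
  cases h : PySem.List.min? xs (fun x => x) with
  | none =>
    rw [PySem.List.min?_eq_none_iff] at h
    subst h; simp at hmem
  | some m =>
    have h1 := PySem.List.min?_mem h
    have h2 := PySem.List.min?_isMin h i hmem
    have h3 := hlb m h1
    simp at h2 ⊢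
    omega

lemma pv_mem_of (text t : String) (p : Nat) (hin : (t, p) ∈ pvKeywordPriority)
    (hq : PySem.Str.isIn t text = true) : p ∈ pvMatched text :=
  List.mem_map.mpr ⟨(t, p), List.mem_filter.mpr ⟨hin, by simpa using hq⟩, rfl⟩

-- ===== VERDICT (by name: the statement is the Claim_ definition above) =====
theorem get_mental_skill_from_protocol_spec : Claim_equal_get_mental_skill_from_protocol := by
  intro protocol_name _
  unfold Spec_get_mental_skill_from_protocol
  have halt : get_mental_skill_from_protocol_alt protocol_name =
      pvCategories.getD ((PySem.List.min? (pvMatched (PySem.Str.lower protocol_name)) (fun x => x)).getD 0) "" := rfl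
  rw [halt]
  by_cases h0 : (["breath", "arousal", "relax", "calm"].any (fun term => PySem.Str.isIn term (PySem.Str.lower protocol_name)) = true)
  · have hmem : (0 : Nat) ∈ pvMatched (PySem.Str.lower protocol_name) := by
      simp only [List.any_eq_true] at h0
      obtain ⟨t, ht, hq⟩ := h0
      fin_cases ht <;> exact pv_mem_of _ _ _ (by simp [pvKeywordPriority]) hq
    have hlb : ∀ m ∈ pvMatched (PySem.Str.lower protocol_name), (0 : Nat) ≤ m := by
      intro m hm
      obtain ⟨⟨t, p⟩, htp, hpm⟩ := List.mem_map.mp hm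
      obtain ⟨hin, hq⟩ := List.mem_filter.mp htp
      fin_cases hin <;> simp_all
    rw [pv_min_getD_eq _ _ hmem hlb]
    simp only [get_mental_skill_from_protocol, h0]
    simp [pvCategories]
  · -- group 0 absent
    by_cases h1 : (["focus", "attention", "concentration", "cue"].any (fun term => PySem.Str.isIn term (PySem.Str.lower protocol_name)) = true)
    · have hmem : (1 : Nat) ∈ pvMatched (PySem.Str.lower protocol_name) := by
        simp only [List.any_eq_true] at h1
        obtain ⟨t, ht, hq⟩ := h1
        fin_cases ht <;> exact pv_mem_of _ _ _ (by simp [pvKeywordPriority]) hq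
      have hlb : ∀ m ∈ pvMatched (PySem.Str.lower protocol_name), (1 : Nat) ≤ m := by
        intro m hm
        obtain ⟨⟨t, p⟩, htp, hpm⟩ := List.mem_map.mp hm
        obtain ⟨hin, hq⟩ := List.mem_filter.mp htp
        fin_cases hin <;> (try simp_all) <;> omega
      rw [pv_min_getD_eq _ _ hmem hlb]
      simp only [get_mental_skill_from_protocol, h0, h1]
      simp [pvCategories]
    · -- group 1 absent
      by_cases h2 : (["confidence", "self-efficacy", "belief"].any (fun term => PySem.Str.isIn term (PySem.Str.lower protocol_name)) = true)
      · have hmem : (2 : Nat) ∈ pvMatched (PySem.Str.lower protocol_name) := by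
          simp only [List.any_eq_true] at h2
          obtain ⟨t, ht, hq⟩ := h2
          fin_cases ht <;> exact pv_mem_of _ _ _ (by simp [pvKeywordPriority]) hq
        have hlb : ∀ m ∈ pvMatched (PySem.Str.lower protocol_name), (2 : Nat) ≤ m := by
          intro m hm
          obtain ⟨⟨t, p⟩, htp, hpm⟩ := List.mem_map.mp hm
          obtain ⟨hin, hq⟩ := List.mem_filter.mp htp
          fin_cases hin <;> (try simp_all) <;> omega
        rw [pv_min_getD_eq _ _ hmem hlb]
        simp only [get_mental_skill_from_protocol, h0, h1, h2]
        simp [pvCategories]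
      · -- group 2 absent
        by_cases h3 : (["self-talk", "cognitive", "reframing"].any (fun term => PySem.Str.isIn term (PySem.Str.lower protocol_name)) = true)
        · have hmem : (3 : Nat) ∈ pvMatched (PySem.Str.lower protocol_name) := by
            simp only [List.any_eq_true] at h3
            obtain ⟨t, ht, hq⟩ := h3
            fin_cases ht <;> exact pv_mem_of _ _ _ (by simp [pvKeywordPriority]) hq
          have hlb : ∀ m ∈ pvMatched (PySem.Str.lower protocol_name), (3 : Nat) ≤ m := by
            intro m hm
            obtain ⟨⟨t, p⟩, htp, hpm⟩ := List.mem_map.mp hm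
            obtain ⟨hin, hq⟩ := List.mem_filter.mp htp
            fin_cases hin <;> (try simp_all) <;> omega
          rw [pv_min_getD_eq _ _ hmem hlb]
          simp only [get_mental_skill_from_protocol, h0, h1, h2, h3]
          simp [pvCategories]
        · -- group 3 absent
          by_cases h4 : (["imagery", "visualization", "mental rehearsal"].any (fun term => PySem.Str.isIn term (PySem.Str.lower protocol_name)) = true)
          · have hmem : (4 : Nat) ∈ pvMatched (PySem.Str.lower protocol_name) := by
              simp only [List.any_eq_true] at h4
              obtain ⟨t, ht, hq⟩ := h4
              fin_cases ht <;> exact pv_mem_of _ _ _ (by simp [pvKeywordPriority]) hq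
            have hlb : ∀ m ∈ pvMatched (PySem.Str.lower protocol_name), (4 : Nat) ≤ m := by
              intro m hm
              obtain ⟨⟨t, p⟩, htp, hpm⟩ := List.mem_map.mp hm
              obtain ⟨hin, hq⟩ := List.mem_filter.mp htp
              fin_cases hin <;> (try simp_all) <;> omega
            rw [pv_min_getD_eq _ _ hmem hlb]
            simp only [get_mental_skill_from_protocol, h0, h1, h2, h3, h4]
            simp [pvCategories]
          · -- group 4 absent
            by_cases h5 : (["routine", "pre-performance", "ritual"].any (fun term => PySem.Str.isIn term (PySem.Str.lower protocol_name)) = true)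
            · have hmem : (5 : Nat) ∈ pvMatched (PySem.Str.lower protocol_name) := by
                simp only [List.any_eq_true] at h5
                obtain ⟨t, ht, hq⟩ := h5
                fin_cases ht <;> exact pv_mem_of _ _ _ (by simp [pvKeywordPriority]) hq
              have hlb : ∀ m ∈ pvMatched (PySem.Str.lower protocol_name), (5 : Nat) ≤ m := by
                intro m hm
                obtain ⟨⟨t, p⟩, htp, hpm⟩ := List.mem_map.mp hm
                obtain ⟨hin, hq⟩ := List.mem_filter.mp htp
                fin_cases hin <;> (try simp_all) <;> omega
              rw [pv_min_getD_eq _ _ hmem hlb]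
              simp only [get_mental_skill_from_protocol, h0, h1, h2, h3, h4, h5]
              simp [pvCategories]
            · -- group 5 absent
              by_cases h6 : (["motivation", "goal", "drive"].any (fun term => PySem.Str.isIn term (PySem.Str.lower protocol_name)) = true)
              · have hmem : (6 : Nat) ∈ pvMatched (PySem.Str.lower protocol_name) := by
                  simp only [List.any_eq_true] at h6
                  obtain ⟨t, ht, hq⟩ := h6
                  fin_cases ht <;> exact pv_mem_of _ _ _ (by simp [pvKeywordPriority]) hq
                have hlb : ∀ m ∈ pvMatched (PySem.Str.lower protocol_name), (6 : Nat) ≤ m := by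
                  intro m hm
                  obtain ⟨⟨t, p⟩, htp, hpm⟩ := List.mem_map.mp hm
                  obtain ⟨hin, hq⟩ := List.mem_filter.mp htp
                  fin_cases hin <;> (try simp_all) <;> omega
                rw [pv_min_getD_eq _ _ hmem hlb]
                simp only [get_mental_skill_from_protocol, h0, h1, h2, h3, h4, h5, h6]
                simp [pvCategories]
              · -- group 6 absent
                by_cases h7 : (["recovery", "resilience", "reset", "post-error"].any (fun term => PySem.Str.isIn term (PySem.Str.lower protocol_name)) = true)
                · have hmem : (7 : Nat) ∈ pvMatched (PySem.Str.lower protocol_name) := by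
                    simp only [List.any_eq_true] at h7
                    obtain ⟨t, ht, hq⟩ := h7
                    fin_cases ht <;> exact pv_mem_of _ _ _ (by simp [pvKeywordPriority]) hq
                  have hlb : ∀ m ∈ pvMatched (PySem.Str.lower protocol_name), (7 : Nat) ≤ m := by
                    intro m hm
                    obtain ⟨⟨t, p⟩, htp, hpm⟩ := List.mem_map.mp hm
                    obtain ⟨hin, hq⟩ := List.mem_filter.mp htp
                    fin_cases hin <;> simp_all
                  rw [pv_min_getD_eq _ _ hmem hlb]
                  simp only [get_mental_skill_from_protocol, h0, h1, h2, h3, h4, h5, h6, h7]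
                  simp [pvCategories]
                · -- group 7 absent
                  have hnil : pvMatched (PySem.Str.lower protocol_name) = [] := by
                    rw [List.eq_nil_iff_forall_not_mem]
                    intro m hm
                    obtain ⟨⟨t, p⟩, htp, hpm⟩ := List.mem_map.mp hm
                    obtain ⟨hin, hq⟩ := List.mem_filter.mp htp
                    fin_cases hin <;> simp_all
                  simp only [get_mental_skill_from_protocol, h0, h1, h2, h3, h4, h5, h6, h7, hnil]
                  simp [PySem.List.min?, pvCategories]
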